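-- pv_equiv track=rewrite | github.com/undefineduser76/PythonAlgorithmStudy | Week5/Q3/네오.py | solution
-- ===== SOURCE A (Python) =====
-- MAX = 1000000001
--
-- def solution(a):
--     min_min = [[MAX for _ in range(len(a))] for _ in range(2)]
--     n = len(a)
--     sweep(0, n, 1, a, min_min[0])
--     sweep(n-1, -1, -1, a, min_min[1])
--
--     answer = 0
--     for i in range(n):
--         if not (a[i] > min_min[0][i] and a[i] > min_min[1][i]):
--             answer += 1
--
--     return answer
--
-- def sweep(s, e, df, a, min_min):
--     now_min = MAX
--
--     for i in range(s, e, df):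
--         min_min[i] = now_min
--         if a[i] < now_min:
--             now_min = a[i]
-- ===== SOURCE B (Python) =====
-- MAX = 1000000001
--
-- def solution(a):
--     # |left-records ∪ right-records| by inclusion-exclusion:
--     # an index qualifies on both sides iff its value is the global minimum (and <= MAX).
--     if not a:
--         return 0
--     mn = min(a)
--     dup = a.count(mn) if mn <= MAX else 0
--     return records(a) + records(a[::-1]) - dup
--
-- def records(xs):
--     # how many positions hold a value <= every earlier value (MAX acts as +infinity)
--     c = 0
--     m = MAX
--     for x in xs:
--         if x <= m:
--             c += 1
--             m = x
--     return c
-- ===== Notes on version B (the rewrite author's own statement) =====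
-- stated objective: simpler
-- what changed: B replaces A's two stored prefix/suffix-min arrays plus a third per-index comparison loop by inclusion-exclusion: it counts running-minimum records of the list and of its reversal and subtracts the multiplicity of the global minimum (the indices minimal on both sides), using no auxiliary arrays at all.
import Mathlib
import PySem

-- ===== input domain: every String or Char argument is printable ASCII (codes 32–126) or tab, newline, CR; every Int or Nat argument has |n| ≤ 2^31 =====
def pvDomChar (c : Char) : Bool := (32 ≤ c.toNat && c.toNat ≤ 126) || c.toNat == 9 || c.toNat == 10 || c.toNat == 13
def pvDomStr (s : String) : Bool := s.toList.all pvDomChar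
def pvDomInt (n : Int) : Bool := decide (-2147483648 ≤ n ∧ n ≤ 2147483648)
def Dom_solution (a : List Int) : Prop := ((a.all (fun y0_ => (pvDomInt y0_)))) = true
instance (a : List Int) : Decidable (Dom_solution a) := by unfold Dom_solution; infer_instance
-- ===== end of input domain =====

-- B counts the answer by inclusion-exclusion (records of a, records of reversed a, minus
-- multiplicity of the global minimum) instead of A's two stored min arrays and comparison loop.

def pvMAX : Int := 1000000001

-- ===== PORT A =====
-- literal port of sweep(s, e, df, a, min_min): writes now_min into min_min[i], then updates now_min
def sweep (s e df : Int) (a : List Int) (mm : List Int) : List Int :=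
  ((PySem.List.pyRange s e df).foldl
    (fun (st : List Int × Int) i =>
      (PySem.List.pySetD st.1 i st.2,
       if PySem.List.pyGetD a i 0 < st.2 then PySem.List.pyGetD a i 0 else st.2))
    (mm, pvMAX)).1

def solution (a : List Int) : Int :=
  let n : Int := (a.length : Int)
  let mm0 := sweep 0 n 1 a (List.replicate a.length pvMAX)
  let mm1 := sweep (n - 1) (-1) (-1) a (List.replicate a.length pvMAX)
  (PySem.List.pyRange 0 n 1).foldl
    (fun answer i =>
      if ¬ (PySem.List.pyGetD a i 0 > PySem.List.pyGetD mm0 i 0 ∧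
            PySem.List.pyGetD a i 0 > PySem.List.pyGetD mm1 i 0)
      then answer + 1 else answer) 0

-- ===== PORT B =====
-- records(xs): how many positions hold a value <= every earlier value (MAX acts as +infinity)
def records (xs : List Int) : Int :=
  (xs.foldl (fun (st : Int × Int) x => if x ≤ st.2 then (st.1 + 1, x) else st)
    ((0 : Int), pvMAX)).1

def solution_alt (a : List Int) : Int :=
  if a = [] then 0
  else
    let mn := (PySem.List.min? a (fun y => y)).getD 0   -- min(a); a ≠ [] so min? is some
    let dup : Int := if mn ≤ pvMAX then ((PySem.List.count a mn : Nat) : Int) else 0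
    records a + records a.reverse - dup                 -- a[::-1] is a.reverse

-- ===== PRECONDITION & SPEC =====
def Spec_solution (a : List Int) (out : Int) : Prop := out = solution_alt a
instance (a : List Int) (out : Int) : Decidable (Spec_solution a out) := by unfold Spec_solution; infer_instance

-- ===== CLAIM (what is proved, stated in full; the proofs are below) =====
def Claim_equal_solution : Prop := ∀ (a : List Int), Dom_solution a → Spec_solution a (solution a)

-- ===== LEMMAS AND PROOFS =====

-- running-min step of A's sweep
def pvMStep (a : List Int) (m : Int) (i : Nat) : Int :=
  if a.getD i 0 < m then a.getD i 0 else m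

-- one write step of A's sweep: store the running min at cell i, then update it
def pvWr (a : List Int) (st : List Int × Int) (i : Nat) : List Int × Int :=
  (st.1.set i st.2, pvMStep a st.2 i)

-- min of a over the indices of idx preceding the (first) occurrence of j, seeded by m
def pvPrefMin (a : List Int) (idx : List Nat) (j : Nat) (m : Int) : Int :=
  (idx.takeWhile (fun i => i != j)).foldl (pvMStep a) m

lemma pvMStep_eq_min (a : List Int) : pvMStep a = fun m i => min m (a.getD i 0) := by
  funext m i
  simp only [pvMStep, min_def]
  split_ifs <;> omega

lemma pvWrFold_getD (a : List Int) :
    ∀ (idx : List Nat) (L : List Int) (m : Int), idx.Nodup →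
      ∀ j, j < L.length →
        ((idx.foldl (pvWr a) (L, m)).1.getD j 0 =
          if j ∈ idx then pvPrefMin a idx j m else L.getD j 0) := by
  intro idx
  induction idx with
  | nil => intro L m _ j hj; simp
  | cons i t ih =>
    intro L m hnd j hj
    simp only [List.foldl_cons]
    have hnd' : t.Nodup := hnd.of_cons
    by_cases hji : j = i
    · subst hji
      have hjt : j ∉ t := (List.nodup_cons.mp hnd).1
      rw [show (pvWr a (L, m) j) = (L.set j m, pvMStep a m j) from rfl] at *
      rw [ih _ _ hnd' j (by simpa using hj)]
      simp only [hjt, if_false]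
      have : ((L.set j m).getD j 0) = m := by
        rw [List.getD_eq_getElem _ _ (by simpa using hj)]
        simp [List.getElem_set_self]
      rw [this]
      simp [pvPrefMin]
    · rw [show (pvWr a (L, m) i) = (L.set i m, pvMStep a m i) from rfl]
      rw [ih _ _ hnd' j (by simpa using hj)]
      have hget : ((L.set i m).getD j 0) = L.getD j 0 := by
        rw [List.getD_eq_getElem _ _ (by simpa using hj), List.getD_eq_getElem _ _ hj]
        simp [List.getElem_set_ne (by omega : ¬ i = j)]
      rw [hget]
      have hpm : pvPrefMin a (i :: t) j m = pvPrefMin a t j (pvMStep a m i) := by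
        simp [pvPrefMin, hji, Ne.symm]
      by_cases hjt : j ∈ t
      · simp [hjt, hji, hpm]
      · simp [hjt, hji]

-- A's forward sweep as the fold of pvWr over range
lemma pvA_fwd (a L : List Int) :
    sweep 0 (a.length : Int) 1 a L =
      ((List.range a.length).foldl (pvWr a) (L, pvMAX)).1 := by
  unfold sweep
  have hr : PySem.List.pyRange 0 (a.length : Int) 1 =
      (List.range a.length).map (fun k : Nat => (k : Int)) := by
    rw [PySem.List.pyRange_one]
    simp
  rw [hr, List.foldl_map]
  have hstep : (fun (st : List Int × Int) (i : Nat) =>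
      (PySem.List.pySetD st.1 (i : Int) st.2,
       if PySem.List.pyGetD a (i : Int) 0 < st.2 then PySem.List.pyGetD a (i : Int) 0 else st.2)) =
      pvWr a := by
    funext st i
    simp [pvWr, pvMStep]
  rw [hstep]

-- A's backward sweep as the fold of pvWr over the reversed range
lemma pvA_bwd (a L : List Int) :
    sweep ((a.length : Int) - 1) (-1) (-1) a L =
      (((List.range a.length).reverse).foldl (pvWr a) (L, pvMAX)).1 := by
  unfold sweep
  have hr : PySem.List.pyRange ((a.length : Int) - 1) (-1) (-1) =
      ((List.range a.length).reverse).map (fun k : Nat => (k : Int)) := by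
    rw [PySem.List.pyRange_neg_one_eq_reverse]
    have : ((a.length : Int) - 1) + 1 = (a.length : Int) := by ring
    rw [show (-1 : Int) + 1 = 0 by ring, this]
    rw [PySem.List.pyRange_one]
    simp [List.map_reverse]
  rw [hr, List.foldl_map]
  have hstep : (fun (st : List Int × Int) (i : Nat) =>
      (PySem.List.pySetD st.1 (i : Int) st.2,
       if PySem.List.pyGetD a (i : Int) 0 < st.2 then PySem.List.pyGetD a (i : Int) 0 else st.2)) =
      pvWr a := by
    funext st i
    simp [pvWr, pvMStep]
  rw [hstep]

-- ----- facts about foldl min -----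

lemma fmin_le_init : ∀ (l : List Int) (m : Int), l.foldl min m ≤ m := by
  intro l
  induction l with
  | nil => intro m; simp
  | cons x t ih => intro m; exact le_trans (ih (min m x)) (min_le_left m x)

lemma fmin_le_mem : ∀ (l : List Int) (m y : Int), y ∈ l → l.foldl min m ≤ y := by
  intro l
  induction l with
  | nil => intro m y hy; cases hy
  | cons x t ih =>
    intro m y hy
    rcases List.mem_cons.mp hy with h | h
    · subst h
      exact le_trans (fmin_le_init t (min m y)) (min_le_right m y)
    · exact ih (min m x) y h

lemma le_fmin : ∀ (l : List Int) (m x : Int), x ≤ m → (∀ y ∈ l, x ≤ y) → x ≤ l.foldl min m := by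
  intro l
  induction l with
  | nil => intro m x hm _; simpa using hm
  | cons z t ih =>
    intro m x hm hall
    exact ih (min m z) x (le_min hm (hall z (by simp))) (fun y hy => hall y (by simp [hy]))

lemma fmin_out : ∀ (l : List Int) (m x : Int), l.foldl min (min m x) = min (l.foldl min m) x := by
  intro l
  induction l with
  | nil => intro m x; rfl
  | cons y t ih =>
    intro m x
    simp only [List.foldl_cons]
    rw [min_right_comm m x y, ih]

lemma fmin_reverse : ∀ (l : List Int) (m : Int), l.reverse.foldl min m = l.foldl min m := by
  intro l
  induction l with
  | nil => intro m; rfl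
  | cons x t ih =>
    intro m
    simp only [List.reverse_cons, List.foldl_append, List.foldl_cons, List.foldl_nil]
    rw [ih, ← fmin_out]

-- ----- index bookkeeping -----

lemma foldl_pvMStep (a : List Int) (idx : List Nat) (m : Int) :
    idx.foldl (pvMStep a) m = (idx.map (fun i => a.getD i 0)).foldl min m := by
  rw [List.foldl_map, pvMStep_eq_min]

lemma getD_map_range_take (a : List Int) (j : Nat) (h : j ≤ a.length) :
    (List.range j).map (fun i => a.getD i 0) = a.take j := by
  apply List.ext_getElem
  · simp [h]
  · intro i h1 h2
    simp only [List.getElem_map, List.getElem_range, List.getElem_take]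
    rw [List.getD_eq_getElem _ _ (by simp at h1; omega)]

lemma getD_map_range_drop (a : List Int) (k : Nat) (h : k ≤ a.length) :
    (List.range (a.length - k)).map (fun x => a.getD (k + x) 0) = a.drop k := by
  apply List.ext_getElem
  · simp
  · intro i h1 h2
    simp only [List.getElem_map, List.getElem_range, List.getElem_drop]
    rw [List.getD_eq_getElem _ _ (by simp at h1; omega)]

lemma tw_range (j n : Nat) (h : j < n) :
    (List.range n).takeWhile (fun i => i != j) = List.range j := by
  have hsplit : List.range n = List.range j ++ (List.range (n - j)).map (fun x => j + x) := by
    rw [← List.range_add, Nat.add_sub_cancel' h.le]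
  rw [hsplit, List.takeWhile_append]
  have hself : (List.range j).takeWhile (fun i => i != j) = List.range j := by
    rw [List.takeWhile_eq_self_iff]
    intro x hx
    simp only [ne_eq, bne_iff_ne]
    have := List.mem_range.mp hx
    omega
  rw [hself, if_pos rfl]
  have hnj : n - j = (n - j - 1) + 1 := by omega
  rw [hnj, List.range_succ_eq_map]
  simp

lemma tw_range_rev (j n : Nat) (h : j < n) :
    ((List.range n).reverse).takeWhile (fun i => i != j) =
      ((List.range (n - (j + 1))).map (fun x => (j + 1) + x)).reverse := by
  have hsplit : List.range n = List.range (j + 1) ++ (List.range (n - (j + 1))).map (fun x => (j + 1) + x) := by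
    rw [← List.range_add, Nat.add_sub_cancel' (by omega : j + 1 ≤ n)]
  rw [hsplit, List.reverse_append, List.takeWhile_append]
  have hself : (((List.range (n - (j + 1))).map (fun x => (j + 1) + x)).reverse).takeWhile
      (fun i => i != j) = ((List.range (n - (j + 1))).map (fun x => (j + 1) + x)).reverse := by
    rw [List.takeWhile_eq_self_iff]
    intro x hx
    rw [List.mem_reverse] at hx
    obtain ⟨y, _, rfl⟩ := List.mem_map.mp hx
    simp only [ne_eq, bne_iff_ne]
    omega
  rw [hself, if_pos rfl]
  rw [List.range_succ, List.reverse_append]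
  simp

lemma pvP_eq (a : List Int) (j : Nat) (h : j < a.length) :
    pvPrefMin a (List.range a.length) j pvMAX = (a.take j).foldl min pvMAX := by
  unfold pvPrefMin
  rw [tw_range j a.length h, foldl_pvMStep, getD_map_range_take a j h.le]

lemma pvS_eq (a : List Int) (j : Nat) (h : j < a.length) :
    pvPrefMin a ((List.range a.length).reverse) j pvMAX = (a.drop (j + 1)).foldl min pvMAX := by
  unfold pvPrefMin
  rw [tw_range_rev j a.length h, foldl_pvMStep, List.map_reverse]
  simp only [List.map_map, Function.comp_def]
  rw [getD_map_range_drop a (j + 1) (by omega), fmin_reverse]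

-- ----- A as a countP over indices -----

lemma A_eq (a : List Int) :
    solution a = (((List.range a.length).countP
      (fun j => decide (a.getD j 0 ≤ (a.take j).foldl min pvMAX ∨
                        a.getD j 0 ≤ (a.drop (j + 1)).foldl min pvMAX))) : Int) := by
  unfold solution
  simp only []
  rw [pvA_fwd, pvA_bwd]
  set mm0 := ((List.range a.length).foldl (pvWr a) (List.replicate a.length pvMAX, pvMAX)).1 with hmm0
  set mm1 := (((List.range a.length).reverse).foldl (pvWr a) (List.replicate a.length pvMAX, pvMAX)).1 with hmm1
  have h0 : ∀ j, j < a.length → mm0.getD j 0 = (a.take j).foldl min pvMAX := by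
    intro j hj
    rw [hmm0, pvWrFold_getD a _ _ _ List.nodup_range j (by simpa using hj),
        if_pos (List.mem_range.mpr hj)]
    exact pvP_eq a j hj
  have h1 : ∀ j, j < a.length → mm1.getD j 0 = (a.drop (j + 1)).foldl min pvMAX := by
    intro j hj
    rw [hmm1, pvWrFold_getD a _ _ _ (List.nodup_reverse.mpr List.nodup_range) j (by simpa using hj),
        if_pos (by simpa using hj)]
    exact pvS_eq a j hj
  have hr : PySem.List.pyRange 0 (a.length : Int) 1 =
      (List.range a.length).map (fun k : Nat => (k : Int)) := by
    rw [PySem.List.pyRange_one]; simp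
  rw [hr, List.foldl_map]
  have hcongr : (List.range a.length).foldl
      (fun (answer : Int) (i : Nat) =>
        if ¬ (PySem.List.pyGetD a (i : Int) 0 > PySem.List.pyGetD mm0 (i : Int) 0 ∧
              PySem.List.pyGetD a (i : Int) 0 > PySem.List.pyGetD mm1 (i : Int) 0)
        then answer + 1 else answer) 0 =
      (List.range a.length).foldl
      (fun (answer : Int) (j : Nat) =>
        if (a.getD j 0 ≤ (a.take j).foldl min pvMAX ∨
            a.getD j 0 ≤ (a.drop (j + 1)).foldl min pvMAX)
        then answer + 1 else answer) 0 := by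
    apply PySem.List.foldl_congr_mem
    intro acc j hjmem
    have hj : j < a.length := List.mem_range.mp hjmem
    rw [PySem.List.pyGetD_natCast, PySem.List.pyGetD_natCast, PySem.List.pyGetD_natCast]
    rw [h0 j hj, h1 j hj]
    have hiff : (¬ (a.getD j 0 > (a.take j).foldl min pvMAX ∧
                    a.getD j 0 > (a.drop (j + 1)).foldl min pvMAX)) ↔
        (a.getD j 0 ≤ (a.take j).foldl min pvMAX ∨
         a.getD j 0 ≤ (a.drop (j + 1)).foldl min pvMAX) := by omega
    rw [if_congr hiff rfl rfl]
  rw [hcongr, PySem.List.foldl_ite_add_one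
    (fun j => a.getD j 0 ≤ (a.take j).foldl min pvMAX ∨
              a.getD j 0 ≤ (a.drop (j + 1)).foldl min pvMAX) (List.range a.length) 0]
  simp

-- ----- B: records as a countP over indices -----

-- spec recursion for records' loop: running state is min m x after each element
def recCount : List Int → Int → Int
  | [], _ => 0
  | x :: t, m => (if x ≤ m then 1 else 0) + recCount t (min m x)

lemma records_fold : ∀ (xs : List Int) (c m : Int),
    (xs.foldl (fun (st : Int × Int) x => if x ≤ st.2 then (st.1 + 1, x) else st) (c, m)).1 =
      c + recCount xs m := by
  intro xs
  induction xs with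
  | nil => intro c m; simp [recCount]
  | cons x t ih =>
    intro c m
    simp only [List.foldl_cons, recCount]
    by_cases h : x ≤ m
    · rw [if_pos h, ih, min_eq_right h, if_pos h]
      ring
    · rw [if_neg h, ih, min_eq_left (by omega), if_neg h]
      ring

lemma records_eq (xs : List Int) : records xs = recCount xs pvMAX := by
  unfold records
  rw [records_fold]
  ring

lemma recCount_countP : ∀ (xs : List Int) (m : Int),
    recCount xs m = (((List.range xs.length).countP
      (fun j => decide (xs.getD j 0 ≤ (xs.take j).foldl min m))) : Int) := by
  intro xs
  induction xs with
  | nil => intro m; simp [recCount]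
  | cons x t ih =>
    intro m
    simp only [recCount, List.length_cons, List.range_succ_eq_map, List.countP_cons,
      List.countP_map]
    have hz : ((x :: t).getD 0 0 ≤ ((x :: t).take 0).foldl min m) = (x ≤ m) := by
      simp
    have hsucc : (fun j => decide ((x :: t).getD (j + 1) 0 ≤ ((x :: t).take (j + 1)).foldl min m)) =
        (fun j => decide (t.getD j 0 ≤ (t.take j).foldl min (min m x))) := by
      funext j
      simp [List.take_succ_cons]
    have : List.countP ((fun j => decide ((x :: t).getD j 0 ≤ ((x :: t).take j).foldl min m)) ∘ Nat.succ)
        (List.range t.length) =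
        List.countP (fun j => decide (t.getD j 0 ≤ (t.take j).foldl min (min m x))) (List.range t.length) := by
      apply List.countP_congr
      intro j _
      simp only [Function.comp]
      simp
    rw [ih (min m x)]
    by_cases h : x ≤ m
    · simp only [hz, h, decide_true, if_pos]
      push_cast [this]
      ring
    · simp only [hz, h, decide_false, if_false]
      push_cast [this]
      simp

-- reindex: records of the reversal counts suffix records
lemma range_reverse_eq_map (n : Nat) :
    (List.range n).reverse = (List.range n).map (fun k => n - 1 - k) := by
  apply List.ext_getElem
  · simp
  · intro i h1 h2
    simp [List.getElem_reverse, List.getElem_range]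

lemma rev_countP (a : List Int) :
    ((List.range a.reverse.length).countP
      (fun k => decide (a.reverse.getD k 0 ≤ (a.reverse.take k).foldl min pvMAX))) =
    ((List.range a.length).countP
      (fun j => decide (a.getD j 0 ≤ (a.drop (j + 1)).foldl min pvMAX))) := by
  rw [List.length_reverse]
  have hperm := (List.reverse_perm (List.range a.length)).countP_eq
    (fun j => decide (a.getD j 0 ≤ (a.drop (j + 1)).foldl min pvMAX))
  rw [← hperm, range_reverse_eq_map, List.countP_map]
  apply List.countP_congr
  intro k hk
  have hkn : k < a.length := List.mem_range.mp hk
  have hget : a.reverse.getD k 0 = a.getD (a.length - 1 - k) 0 := by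
    rw [List.getD_eq_getElem _ _ (by simpa using hkn),
        List.getD_eq_getElem _ _ (by omega : a.length - 1 - k < a.length)]
    simp [List.getElem_reverse]
  have htake : a.reverse.take k = (a.drop (a.length - k)).reverse := List.take_reverse
  have hdrop : a.length - 1 - k + 1 = a.length - k := by omega
  simp only [Function.comp, hget, htake, fmin_reverse, hdrop]

-- ----- the correction term counts the both-sided records -----

lemma both_iff (a : List Int) (j : Nat) (h : j < a.length) :
    ((a.getD j 0 ≤ (a.take j).foldl min pvMAX ∧ a.getD j 0 ≤ (a.drop (j + 1)).foldl min pvMAX)) ↔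
      (a.getD j 0 ≤ pvMAX ∧ ∀ y ∈ a, a.getD j 0 ≤ y) := by
  constructor
  · rintro ⟨hp, hs⟩
    refine ⟨le_trans hp (fmin_le_init _ _), ?_⟩
    intro y hy
    rw [← List.take_append_drop j a] at hy
    rcases List.mem_append.mp hy with hmem | hmem
    · exact le_trans hp (fmin_le_mem _ _ _ hmem)
    · rw [List.drop_eq_getElem_cons h] at hmem
      rcases List.mem_cons.mp hmem with rfl | hmem
      · rw [List.getD_eq_getElem _ _ h]
      · exact le_trans hs (fmin_le_mem _ _ _ hmem)
  · rintro ⟨hM, hall⟩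
    constructor
    · exact le_fmin _ _ _ hM (fun y hy => hall y (List.mem_of_mem_take hy))
    · exact le_fmin _ _ _ hM (fun y hy => hall y (List.mem_of_mem_drop hy))

lemma countIdx_eq_count (a : List Int) (v : Int) :
    ((List.range a.length).countP (fun j => decide (a.getD j 0 = v))) = a.count v := by
  have hmap : (List.range a.length).map (fun i => a.getD i 0) = a := by
    rw [getD_map_range_take a a.length le_rfl, List.take_length]
  calc ((List.range a.length).countP (fun j => decide (a.getD j 0 = v)))
      = ((List.range a.length).map (fun i => a.getD i 0)).countP (fun y => decide (y = v)) := by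
        rw [List.countP_map]; rfl
    _ = a.countP (fun y => decide (y = v)) := by rw [hmap]
    _ = a.count v := by
        rw [List.count_eq_countP]
        apply List.countP_congr
        intro y _
        simp

lemma dup_eq (a : List Int) (ha : a ≠ []) :
    (if ((PySem.List.min? a (fun y => y)).getD 0) ≤ pvMAX
     then ((PySem.List.count a ((PySem.List.min? a (fun y => y)).getD 0) : Nat) : Int) else 0) =
    (((List.range a.length).countP
      (fun j => decide (a.getD j 0 ≤ (a.take j).foldl min pvMAX ∧
                        a.getD j 0 ≤ (a.drop (j + 1)).foldl min pvMAX))) : Int) := by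
  obtain ⟨mn, hmn⟩ : ∃ mn, PySem.List.min? a (fun y => y) = some mn := by
    cases hcase : PySem.List.min? a (fun y => y) with
    | none => exact absurd ((PySem.List.min?_eq_none_iff _ _).mp hcase) ha
    | some mn => exact ⟨mn, rfl⟩
  have hmem : mn ∈ a := PySem.List.min?_mem hmn
  have hmin : ∀ y ∈ a, mn ≤ y := PySem.List.min?_isMin hmn
  rw [hmn]
  simp only [Option.getD_some]
  have hcond : ∀ j ∈ List.range a.length,
      ((decide (a.getD j 0 ≤ (a.take j).foldl min pvMAX ∧
                a.getD j 0 ≤ (a.drop (j + 1)).foldl min pvMAX)) = true ↔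
       (decide (mn ≤ pvMAX ∧ a.getD j 0 = mn)) = true) := by
    intro j hj
    have hjn : j < a.length := List.mem_range.mp hj
    have hja : a.getD j 0 ∈ a := by
      rw [List.getD_eq_getElem _ _ hjn]
      exact List.getElem_mem hjn
    simp only [decide_eq_true_eq]
    rw [both_iff a j hjn]
    constructor
    · rintro ⟨hM, hall⟩
      have h1 : a.getD j 0 ≤ mn := hall mn hmem
      have h2 : mn ≤ a.getD j 0 := hmin _ hja
      have heq : a.getD j 0 = mn := le_antisymm h1 h2
      exact ⟨heq ▸ hM, heq⟩
    · rintro ⟨hM, heq⟩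
      exact ⟨heq ▸ hM, by intro y hy; rw [heq]; exact hmin y hy⟩
  rw [List.countP_congr hcond]
  by_cases hM : mn ≤ pvMAX
  · rw [if_pos hM]
    have : ∀ j ∈ List.range a.length,
        ((decide (mn ≤ pvMAX ∧ a.getD j 0 = mn)) = true ↔
         (decide (a.getD j 0 = mn)) = true) := by
      intro j _
      simp [hM]
    rw [List.countP_congr this, countIdx_eq_count, PySem.List.count_eq]
  · rw [if_neg hM]
    have : ∀ j ∈ List.range a.length,
        ((decide (mn ≤ pvMAX ∧ a.getD j 0 = mn)) = true ↔
         (fun _ : Nat => false) j = true) := by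
      intro j _
      simp [hM]
    rw [List.countP_congr this]
    simp

-- inclusion-exclusion on countP
lemma countP_or_and (l : List Nat) (p q : Nat → Bool) :
    l.countP (fun x => p x || q x) + l.countP (fun x => p x && q x) =
      l.countP p + l.countP q := by
  induction l with
  | nil => rfl
  | cons x t ih =>
    simp only [List.countP_cons]
    cases hp : p x <;> cases hq : q x <;> simp <;> omega

-- ===== VERDICT (by name: the statement is the Claim_ definition above) =====
theorem solution_spec : Claim_equal_solution := by
  intro a _
  unfold Spec_solution
  by_cases ha : a = []
  · subst ha
    decide
  · rw [A_eq]
    unfold solution_alt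
    rw [if_neg ha]
    simp only []
    rw [records_eq a, records_eq a.reverse, recCount_countP a pvMAX,
        recCount_countP a.reverse pvMAX, rev_countP a, dup_eq a ha]
    have hie := countP_or_and (List.range a.length)
      (fun j => decide (a.getD j 0 ≤ (a.take j).foldl min pvMAX))
      (fun j => decide (a.getD j 0 ≤ (a.drop (j + 1)).foldl min pvMAX))
    have hor : (List.range a.length).countP
        (fun j => decide (a.getD j 0 ≤ (a.take j).foldl min pvMAX ∨
                          a.getD j 0 ≤ (a.drop (j + 1)).foldl min pvMAX)) =
        (List.range a.length).countP
        (fun j => (decide (a.getD j 0 ≤ (a.take j).foldl min pvMAX) ||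
                   decide (a.getD j 0 ≤ (a.drop (j + 1)).foldl min pvMAX))) := by
      apply List.countP_congr; intro j _; simp
    have hand : (List.range a.length).countP
        (fun j => decide (a.getD j 0 ≤ (a.take j).foldl min pvMAX ∧
                          a.getD j 0 ≤ (a.drop (j + 1)).foldl min pvMAX)) =
        (List.range a.length).countP
        (fun j => (decide (a.getD j 0 ≤ (a.take j).foldl min pvMAX) &&
                   decide (a.getD j 0 ≤ (a.drop (j + 1)).foldl min pvMAX))) := by
      apply List.countP_congr; intro j _; simp
    rw [hor, hand]
    omega
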